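-- pv_equiv track=rewrite | github.com/isVy08/C4E | cluster.py | search_candidates
-- ===== SOURCE A (Python) =====
-- def search_candidates(target_cluster, ref_cluster,
--                       search_type, cause_effect_id):
--
--   removed = set()
--   if search_type == 'cause':
--     # Search member A is a cause of any member B
--     for k in ref_cluster:
--       try:
--         causes = cause_effect_id[k]
--         for v in causes:
--           if v in target_cluster:
--             removed.add(v)
--       except KeyError:
--         pass
--
--   else:
--     # Search member A is a effect of any member B
--     for k in target_cluster:
--       try:
--         causes = cause_effect_id[k]
--         for v in causes:
--           if v in ref_cluster:
--             removed.add(k)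
--             break
--       except KeyError:
--         pass
--
--   return removed
-- ===== SOURCE B (Python) =====
-- def search_candidates(target_cluster, ref_cluster, search_type, cause_effect_id):
--     if search_type == 'cause':
--         # Index pass over the mapping: narrow every cause list to its target members.
--         target_set = set(target_cluster)
--         hits = {k: [v for v in vs if v in target_set]
--                 for k, vs in cause_effect_id.items()}
--         # The removed members are then a pure lookup-and-concatenate over ref_cluster.
--         return set(v for k in ref_cluster for v in hits.get(k, ()))
--     # Index pass over the mapping: the keys whose cause list meets ref_cluster.
--     ref_set = set(ref_cluster)
--     linked = {k for k, vs in cause_effect_id.items() if not ref_set.isdisjoint(vs)}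
--     # The removed members are then a pure membership filter over target_cluster.
--     return {k for k in target_cluster if k in linked}
-- ===== Notes on version B (the rewrite author's own statement) =====
-- stated objective: alternative
-- what changed: B inverts the traversal: instead of A's loop over the cluster list probing the dict per key with an inner scan-and-add (and break), B makes one index-building pass over the mapping itself (cause: pre-narrow every cause list to target members; effect: precompute the set of keys whose cause list meets ref_cluster) and then the cluster pass is a pure lookup-concatenate resp. membership filter.
import Mathlib
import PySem

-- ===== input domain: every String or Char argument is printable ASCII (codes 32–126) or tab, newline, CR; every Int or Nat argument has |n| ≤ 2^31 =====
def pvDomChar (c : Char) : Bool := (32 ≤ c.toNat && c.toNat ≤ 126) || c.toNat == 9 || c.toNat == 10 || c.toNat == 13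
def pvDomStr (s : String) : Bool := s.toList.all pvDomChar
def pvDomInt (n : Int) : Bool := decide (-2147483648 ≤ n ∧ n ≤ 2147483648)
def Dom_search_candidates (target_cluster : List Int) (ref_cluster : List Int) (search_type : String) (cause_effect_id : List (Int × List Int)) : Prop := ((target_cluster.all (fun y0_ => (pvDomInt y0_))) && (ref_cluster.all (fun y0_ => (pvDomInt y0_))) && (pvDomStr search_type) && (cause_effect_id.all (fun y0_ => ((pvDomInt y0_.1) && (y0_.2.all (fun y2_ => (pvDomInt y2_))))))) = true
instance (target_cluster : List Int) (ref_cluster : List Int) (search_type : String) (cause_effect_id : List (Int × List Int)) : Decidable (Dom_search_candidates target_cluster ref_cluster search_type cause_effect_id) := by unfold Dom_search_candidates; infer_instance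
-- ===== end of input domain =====

-- B builds an index in one pass over the mapping (pre-filtered cause lists / the set of linked keys)
-- and then does a pure concatenate/filter pass over the cluster list, instead of A's cluster loop that
-- probes the dict per key with an inner scan-and-add; objective: alternative decomposition.


-- ===== PORT A =====
-- inner 'for v in causes: if v in ref_cluster: removed.add(k); break' loop of A's effect branch
def pvEffectScan (ref_cluster : List Int) (removed : PySem.Set Int) (k : Int) : List Int → PySem.Set Int
  | [] => removed
  | v :: vs => if ref_cluster.contains v then PySem.Set.add removed k else pvEffectScan ref_cluster removed k vs

def search_candidates (target_cluster : List Int) (ref_cluster : List Int) (search_type : String) (cause_effect_id : List (Int × List Int)) : List Int :=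
  if search_type == "cause" then
    ref_cluster.foldl (fun removed k =>
      match (PySem.Dict.mk cause_effect_id).get? k with
      | none => removed          -- except KeyError: pass
      | some causes => causes.foldl (fun s v => if target_cluster.contains v then PySem.Set.add s v else s) removed)
      PySem.Set.empty
  else
    target_cluster.foldl (fun removed k =>
      match (PySem.Dict.mk cause_effect_id).get? k with
      | none => removed          -- except KeyError: pass
      | some causes => pvEffectScan ref_cluster removed k causes)
      PySem.Set.empty

-- ===== PORT B =====
def search_candidates_alt (target_cluster : List Int) (ref_cluster : List Int) (search_type : String) (cause_effect_id : List (Int × List Int)) : List Int :=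
  if search_type == "cause" then
    let targetSet := PySem.Set.ofList target_cluster
    -- index pass over the mapping's items: narrow every cause list to its target members
    let hits := PySem.Dict.mk (cause_effect_id.map (fun p => (p.1, p.2.filter (fun v => PySem.Set.contains targetSet v))))
    PySem.Set.ofList (ref_cluster.flatMap (fun k => hits.getD k []))
  else
    let refSet := PySem.Set.ofList ref_cluster
    -- index pass over the mapping's items: the keys whose cause list meets ref_cluster
    let linked := PySem.Set.ofList ((cause_effect_id.filter (fun p => !(PySem.Set.isdisjoint refSet p.2))).map (fun p => p.1))
    PySem.Set.ofList (target_cluster.filter (fun k => PySem.Set.contains linked k))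

-- ===== PRECONDITION & SPEC =====
-- Pre_ excludes association lists with duplicate keys: they represent no Python dict (A's
-- cause_effect_id is a dict, which cannot hold them), and on them first-match lookup vs an
-- items scan are both arbitrary readings.
def Pre_search_candidates (target_cluster : List Int) (ref_cluster : List Int) (search_type : String) (cause_effect_id : List (Int × List Int)) : Prop :=
  (cause_effect_id.map Prod.fst).Nodup
instance (target_cluster : List Int) (ref_cluster : List Int) (search_type : String) (cause_effect_id : List (Int × List Int)) : Decidable (Pre_search_candidates target_cluster ref_cluster search_type cause_effect_id) := by unfold Pre_search_candidates; infer_instance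
def pvWitness_search_candidates : List Int × List Int × String × (List (Int × List Int)) := ([1, 2], [3], "cause", [(3, [1]), (1, [3])])
def Spec_search_candidates (target_cluster : List Int) (ref_cluster : List Int) (search_type : String) (cause_effect_id : List (Int × List Int)) (out : List Int) : Prop := out = search_candidates_alt target_cluster ref_cluster search_type cause_effect_id
instance (target_cluster : List Int) (ref_cluster : List Int) (search_type : String) (cause_effect_id : List (Int × List Int)) (out : List Int) : Decidable (Spec_search_candidates target_cluster ref_cluster search_type cause_effect_id out) := by unfold Spec_search_candidates; infer_instance

-- ===== CLAIM (what is proved, stated in full; the proofs are below) =====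
def Claim_equal_search_candidates : Prop := ∀ (target_cluster : List Int) (ref_cluster : List Int) (search_type : String) (cause_effect_id : List (Int × List Int)), Dom_search_candidates target_cluster ref_cluster search_type cause_effect_id → Pre_search_candidates target_cluster ref_cluster search_type cause_effect_id → Spec_search_candidates target_cluster ref_cluster search_type cause_effect_id (search_candidates target_cluster ref_cluster search_type cause_effect_id)

-- ===== LEMMAS AND PROOFS =====

-- flatten A's per-key loop over dict values into one fold over the concatenated value stream
theorem foldl_values_flatten (ce : List (Int × List Int)) (g : PySem.Set Int → Int → PySem.Set Int)
    (r : List Int) (init : PySem.Set Int) :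
    r.foldl (fun s k =>
      match (PySem.Dict.mk ce).get? k with
      | none => s
      | some causes => causes.foldl g s) init
    = (r.flatMap (fun k => (PySem.Dict.mk ce).getD k [])).foldl g init := by
  simp only [PySem.Dict.getD]
  induction r generalizing init with
  | nil => rfl
  | cons k ks ih =>
    simp only [List.foldl_cons, List.flatMap_cons, List.foldl_append]
    cases (PySem.Dict.mk ce).get? k <;> simp [ih]

-- a conditional-add fold is the dedup of the filtered stream
theorem foldl_cond_add (p : Int → Bool) (xs : List Int) :
    xs.foldl (fun s v => if p v then PySem.Set.add s v else s) PySem.Set.empty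
    = PySem.Set.ofList (xs.filter p) := by
  rw [PySem.Set.ofList_eq_foldl, List.foldl_filter]
  rfl

-- membership test against set(xs) is membership in xs
theorem contains_ofList (xs : List Int) (v : Int) :
    PySem.Set.contains (PySem.Set.ofList xs) v = xs.contains v := by
  simp only [PySem.Set.contains, List.contains_eq_mem]
  simp [PySem.Set.mem_ofList]

-- the break-loop of A's effect branch is an existence test
theorem pvEffectScan_eq_any (r : List Int) (s : PySem.Set Int) (k : Int) (cs : List Int) :
    pvEffectScan r s k cs = if cs.any r.contains then PySem.Set.add s k else s := by
  induction cs with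
  | nil => rfl
  | cons v vs ih =>
    simp only [pvEffectScan, List.any_cons, ih]
    by_cases h : v ∈ r <;> simp [h]

-- B's per-entry-mapped dict looks up as the mapped lookup of the original assoc list
theorem get?_mk_map (f : List Int → List Int) (l : List (Int × List Int)) (k : Int) :
    (PySem.Dict.mk (l.map (fun p => (p.1, f p.2)))).get? k
      = ((PySem.Dict.mk l).get? k).map f := by
  induction l with
  | nil => rfl
  | cons a rest ih =>
    obtain ⟨ak, av⟩ := a
    simp only [List.map_cons, PySem.Dict.get?_mk_cons]
    by_cases h : (ak == k) = true
    · rw [if_pos h, if_pos h]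
      rfl
    · rw [if_neg h, if_neg h]
      exact ih

-- with unique keys, membership of k among the first components of the filtered items
-- is an existence statement about the (first-match) lookup at k
theorem mem_map_fst_filter (q : Int × List Int → Bool) (l : List (Int × List Int)) (k : Int)
    (hnd : (l.map Prod.fst).Nodup) :
    k ∈ (l.filter q).map Prod.fst
      ↔ ∃ vs, (PySem.Dict.mk l).get? k = some vs ∧ q (k, vs) = true := by
  induction l with
  | nil => simp [PySem.Dict.get?]
  | cons a rest ih =>
    obtain ⟨ak, av⟩ := a
    simp only [List.map_cons, List.nodup_cons] at hnd
    obtain ⟨ha, hrest⟩ := hnd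
    rw [List.filter_cons]
    simp only [PySem.Dict.get?_mk_cons]
    by_cases hk : ak = k
    · subst hk
      simp only [beq_self_eq_true, if_true, Option.some.injEq]
      constructor
      · intro hm
        by_cases hq : q (ak, av) = true
        · exact ⟨av, rfl, hq⟩
        · rw [if_neg hq] at hm
          exact absurd (List.map_subset Prod.fst List.filter_sublist.subset hm) ha
      · rintro ⟨vs, hvs, hq⟩
        subst hvs
        rw [if_pos hq]
        simp
    · by_cases hq : q (ak, av) = true
      · rw [if_pos hq]
        simp only [List.map_cons, List.mem_cons]
        rw [ih hrest, if_neg (show ¬((ak == k) = true) by simp [hk])]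
        exact ⟨fun h => h.elim (fun h' => absurd h'.symm hk) id, Or.inr⟩
      · rw [if_neg hq, if_neg (show ¬((ak == k) = true) by simp [hk])]
        exact ih hrest

-- ===== VERDICT (by name: the statement is the Claim_ definition above) =====
theorem search_candidates_spec : Claim_equal_search_candidates := by
  intro t r st ce _ hpre
  unfold Spec_search_candidates search_candidates search_candidates_alt
  by_cases hst : (st == "cause") = true
  · rw [if_pos hst, if_pos hst]
    rw [foldl_values_flatten, foldl_cond_add]
    have hgetD : ∀ k, (PySem.Dict.mk (ce.map (fun p => (p.1, p.2.filter (fun v => PySem.Set.contains (PySem.Set.ofList t) v))))).getD k []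
        = ((PySem.Dict.mk ce).getD k []).filter (fun v => PySem.Set.contains (PySem.Set.ofList t) v) := by
      intro k
      simp only [PySem.Dict.getD, get?_mk_map]
      cases (PySem.Dict.mk ce).get? k <;> simp
    simp only [hgetD]
    rw [← List.filter_flatMap]
    congr 1
    apply List.filter_congr
    intro v _
    exact (contains_ofList t v).symm
  · rw [if_neg hst, if_neg hst]
    have hstep : (fun (removed : PySem.Set Int) (k : Int) =>
        match (PySem.Dict.mk ce).get? k with
        | none => removed
        | some causes => pvEffectScan r removed k causes)
        = (fun (removed : PySem.Set Int) (k : Int) =>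
            if ((PySem.Dict.mk ce).getD k []).any r.contains
            then PySem.Set.add removed k else removed) := by
      funext s k
      cases h : (PySem.Dict.mk ce).get? k <;>
        simp [PySem.Dict.getD, h, pvEffectScan_eq_any]
    rw [hstep, foldl_cond_add]
    congr 1
    apply List.filter_congr
    intro k _
    -- pointwise: A's any-test equals B's membership in the precomputed linked set
    rw [Bool.eq_iff_iff]
    have hlinked : PySem.Set.contains (PySem.Set.ofList ((ce.filter (fun p => !(PySem.Set.isdisjoint (PySem.Set.ofList r) p.2))).map (fun p => p.1))) k = true
        ↔ k ∈ (ce.filter (fun p => !(PySem.Set.isdisjoint (PySem.Set.ofList r) p.2))).map Prod.fst := by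
      simp only [PySem.Set.contains_eq_listContains, List.contains_eq_mem, decide_eq_true_eq]
      exact ⟨fun h => by simpa [PySem.Set.mem_ofList] using h, fun h => by simpa [PySem.Set.mem_ofList] using h⟩
    rw [hlinked, mem_map_fst_filter _ _ _ hpre]
    cases hg : (PySem.Dict.mk ce).get? k with
    | none => simp [PySem.Dict.getD, hg]
    | some cs =>
      simp only [PySem.Dict.getD, hg, Option.getD_some, Option.some.injEq]
      constructor
      · intro hany
        refine ⟨cs, rfl, ?_⟩
        simp only [PySem.Set.isdisjoint, Bool.not_not, List.any_eq_true] at *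
        obtain ⟨v, hv, hvr⟩ := hany
        exact ⟨v, by simpa [PySem.Set.mem_ofList] using hvr, by simpa [PySem.Set.contains_eq_listContains] using hv⟩
      · rintro ⟨vs, rfl, hq⟩
        simp only [PySem.Set.isdisjoint, Bool.not_not, List.any_eq_true] at *
        obtain ⟨x, hx, hxvs⟩ := hq
        exact ⟨x, by simpa [PySem.Set.contains_eq_listContains] using hxvs, by simpa [PySem.Set.mem_ofList] using hx⟩
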